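-- pv_equiv track=rewrite | github.com/danielpham765/novel-tts | novel_tts/queue/translation_queue.py | _extract_proc_meta
-- ===== SOURCE A (Python) =====
-- def _extract_proc_meta(argv: list[str]) -> tuple[str, str, str]:
--     log_file = ""
--     key_index = ""
--     model = ""
--     for idx, token in enumerate(argv):
--         if token == "--log-file" and idx + 1 < len(argv):
--             log_file = argv[idx + 1]
--         elif token == "--key-index" and idx + 1 < len(argv):
--             key_index = argv[idx + 1]
--         elif token == "--model" and idx + 1 < len(argv):
--             model = argv[idx + 1]
--     return log_file, key_index, model
-- ===== SOURCE B (Python) =====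
-- def _last_value(flag, argv):
--     pairs = list(zip(argv, argv[1:]))
--     for tok, val in reversed(pairs):
--         if tok == flag:
--             return val
--     return ""
--
--
-- def _extract_proc_meta(argv: list[str]) -> tuple[str, str, str]:
--     return (
--         _last_value("--log-file", argv),
--         _last_value("--key-index", argv),
--         _last_value("--model", argv),
--     )
-- ===== Notes on version B (the rewrite author's own statement) =====
-- stated objective: alternative
-- what changed: Replaced the single forward pass with three last-wins accumulators by a per-flag helper that zips argv with its tail and scans the pairs in reverse, returning at the first (i.e. last) occurrence of the flag.
import Mathlib
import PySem

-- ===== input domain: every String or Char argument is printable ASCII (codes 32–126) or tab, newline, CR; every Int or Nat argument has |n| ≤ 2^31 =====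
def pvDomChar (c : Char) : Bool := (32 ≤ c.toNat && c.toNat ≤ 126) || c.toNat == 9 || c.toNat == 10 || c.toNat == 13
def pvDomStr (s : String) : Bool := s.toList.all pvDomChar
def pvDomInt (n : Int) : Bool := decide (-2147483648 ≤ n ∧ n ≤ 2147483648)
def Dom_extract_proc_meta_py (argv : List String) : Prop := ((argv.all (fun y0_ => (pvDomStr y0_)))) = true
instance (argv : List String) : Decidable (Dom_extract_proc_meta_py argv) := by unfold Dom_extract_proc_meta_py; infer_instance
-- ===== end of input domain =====

-- B replaces A's single pass keeping three last-wins accumulators by a per-flag reverse scan of adjacent pairs; objective: alternative decomposition (same cost).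

-- ===== PORT A =====
-- the loop body of A (one step of the for loop over enumerate(argv))
def stepA (argv : List String) (st : String × String × String) (p : Int × String) :
    String × String × String :=
  if p.2 == "--log-file" && decide (p.1 + 1 < PySem.List.len argv) then
    ((PySem.List.pyGet? argv (p.1 + 1)).getD "", st.2.1, st.2.2)
  else if p.2 == "--key-index" && decide (p.1 + 1 < PySem.List.len argv) then
    (st.1, (PySem.List.pyGet? argv (p.1 + 1)).getD "", st.2.2)
  else if p.2 == "--model" && decide (p.1 + 1 < PySem.List.len argv) then
    (st.1, st.2.1, (PySem.List.pyGet? argv (p.1 + 1)).getD "")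
  else st

def extract_proc_meta_py (argv : List String) : String × String × String :=
  (PySem.List.enumerate argv 0).foldl (stepA argv) ("", "", "")

-- ===== PORT B =====
-- the 'for tok, val in reversed(pairs)' loop of _last_value
def findVal (flag : String) : List (String × String) → String
  | [] => ""
  | (tok, v) :: rest => if tok == flag then v else findVal flag rest

def lastValuePy (flag : String) (argv : List String) : String :=
  let pairs := argv.zip (PySem.List.slice argv (some 1) none)
  findVal flag pairs.reverse

def extract_proc_meta_py_alt (argv : List String) : String × String × String :=
  (lastValuePy "--log-file" argv, lastValuePy "--key-index" argv, lastValuePy "--model" argv)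

-- ===== PRECONDITION & SPEC =====
def Spec_extract_proc_meta_py (argv : List String) (out : String × String × String) : Prop := out = extract_proc_meta_py_alt argv
instance (argv : List String) (out : String × String × String) : Decidable (Spec_extract_proc_meta_py argv out) := by unfold Spec_extract_proc_meta_py; infer_instance

-- ===== CLAIM (what is proved, stated in full; the proofs are below) =====
def Claim_equal_extract_proc_meta_py : Prop := ∀ (argv : List String), Dom_extract_proc_meta_py argv → Spec_extract_proc_meta_py argv (extract_proc_meta_py argv)

-- ===== LEMMAS AND PROOFS =====

-- A's loop body expressed on an adjacent pair (token, next token)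
def stepP (st : String × String × String) (p : String × String) : String × String × String :=
  if p.1 == "--log-file" then (p.2, st.2.1, st.2.2)
  else if p.1 == "--key-index" then (st.1, p.2, st.2.2)
  else if p.1 == "--model" then (st.1, st.2.1, p.2)
  else st

-- findVal with an arbitrary default
def findValD (flag d : String) : List (String × String) → String
  | [] => d
  | (tok, v) :: rest => if tok == flag then v else findValD flag d rest

theorem findVal_eq_findValD (flag : String) (l : List (String × String)) :
    findVal flag l = findValD flag "" l := by
  induction l with
  | nil => rfl
  | cons p rest ih => cases p; simp [findVal, findValD, ih]

theorem foldA_eq_foldP (zs : List String) : ∀ (ys : List String) (st : String × String × String),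
    (PySem.List.enumerate zs ((ys.length : Int))).foldl (stepA (ys ++ zs)) st
      = (zs.zip zs.tail).foldl stepP st := by
  induction zs with
  | nil => intro ys st; simp [PySem.List.enumerate_nil]
  | cons z zs ih =>
    intro ys st
    rw [PySem.List.enumerate_cons]
    cases zs with
    | nil =>
      -- the 'idx + 1 < len(argv)' guard fails for the last element, so the step is the identity
      simp [List.foldl, stepA, PySem.List.enumerate_nil]
    | cons w rest =>
      have hlen : (ys.length : Int) + 1 < PySem.List.len (ys ++ z :: w :: rest) := by
        simp [PySem.List.len]
      have hget : PySem.List.pyGet? (ys ++ z :: w :: rest) ((ys.length : Int) + 1) = some w := by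
        have : ((ys.length : Int) + 1) = ((ys.length + 1 : Nat) : Int) := by push_cast; ring
        rw [this, PySem.List.pyGet?_natCast]
        rw [List.getElem?_append_right (by omega)]
        simp
      have hstep : stepA (ys ++ z :: w :: rest) st ((ys.length : Int), z) = stepP st (z, w) := by
        have := hlen
        simp [stepA, stepP, hget]
      have harg : ys ++ z :: w :: rest = (ys ++ [z]) ++ (w :: rest) := by simp
      have hn : ((ys.length : Int)) + 1 = (((ys ++ [z]).length : Nat) : Int) := by
        simp
      calc ((((ys.length : Int)), z) :: PySem.List.enumerate (w :: rest) ((ys.length : Int) + 1)).foldl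
              (stepA (ys ++ z :: w :: rest)) st
          = (PySem.List.enumerate (w :: rest) (((ys ++ [z]).length : Int))).foldl
              (stepA ((ys ++ [z]) ++ (w :: rest))) (stepP st (z, w)) := by
            rw [List.foldl_cons, hstep, ← hn, ← harg]
        _ = ((w :: rest).zip (w :: rest).tail).foldl stepP (stepP st (z, w)) := ih (ys ++ [z]) _
        _ = ((z :: w :: rest).zip (z :: w :: rest).tail).foldl stepP st := by
            simp [List.zip]

theorem foldP_eq_findValD (ps : List (String × String)) (st : String × String × String) :
    ps.foldl stepP st = (findValD "--log-file" st.1 ps.reverse,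
      findValD "--key-index" st.2.1 ps.reverse, findValD "--model" st.2.2 ps.reverse) := by
  induction ps using List.reverseRecOn generalizing st with
  | nil => simp [findValD]
  | append_singleton qs p ih =>
    rcases p with ⟨tok, v⟩
    rw [List.foldl_append, List.foldl_cons, List.foldl_nil]
    rw [ih st]
    by_cases h1 : tok = "--log-file"
    · simp [stepP, findValD, h1]
    · by_cases h2 : tok = "--key-index"
      · simp [stepP, findValD, h2]
      · by_cases h3 : tok = "--model"
        · simp [stepP, findValD, h3]
        · simp [stepP, findValD, h1, h2, h3]

-- ===== VERDICT (by name: the statement is the Claim_ definition above) =====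
theorem extract_proc_meta_py_spec : Claim_equal_extract_proc_meta_py := by
  intro argv _
  unfold Spec_extract_proc_meta_py extract_proc_meta_py extract_proc_meta_py_alt lastValuePy
  have h0 : (PySem.List.enumerate argv 0).foldl (stepA argv) ("", "", "")
      = (argv.zip argv.tail).foldl stepP ("", "", "") := by
    have := foldA_eq_foldP argv [] ("", "", "")
    simpa using this
  rw [h0, foldP_eq_findValD]
  simp [PySem.List.slice_from_one, findVal_eq_findValD]
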